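-- pv_equiv track=rewrite | github.com/bartekpacia/matura | zbior/58/583.py | znajdz_dni_rekordowe
-- ===== SOURCE A (Python) =====
-- from typing import List
--
-- def znajdz_dni_rekordowe(dane: List[int]) -> List[bool]:
--   result: List[bool] = [False] * len(dane) # True znaczy że jest to Rekordowy Dzień
--
--   max_temp = dane[0]
--   result[0] = True # zgodnie z treścią zadania, pierwsza wartość też jest rekordem
--   for i in range(len(dane)):
--       temp = dane[i]
--
--       if temp > max_temp:
--         max_temp = temp
--         result[i] = True
--
--
--   return result
-- ===== SOURCE B (Python) =====
-- from typing import List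
--
-- def znajdz_dni_rekordowe(dane: List[int]) -> List[bool]:
--     # two-pass: first build the prefix-maximum table, then compare each later
--     # day with the maximum of all days strictly before it
--     prefix: List[int] = dane[:1]
--     for t in dane[1:]:
--         prefix.append(t if t > prefix[-1] else prefix[-1])
--     return [True] + [t > m for t, m in zip(dane[1:], prefix)]
-- ===== Notes on version B (the rewrite author's own statement) =====
-- stated objective: alternative
-- what changed: Replaces the single running-max scan that flips entries of a pre-allocated False array in place by a two-pass structure: build the prefix-maximum table, then produce the result list by comparing each day with the maximum before it.
import Mathlib
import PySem

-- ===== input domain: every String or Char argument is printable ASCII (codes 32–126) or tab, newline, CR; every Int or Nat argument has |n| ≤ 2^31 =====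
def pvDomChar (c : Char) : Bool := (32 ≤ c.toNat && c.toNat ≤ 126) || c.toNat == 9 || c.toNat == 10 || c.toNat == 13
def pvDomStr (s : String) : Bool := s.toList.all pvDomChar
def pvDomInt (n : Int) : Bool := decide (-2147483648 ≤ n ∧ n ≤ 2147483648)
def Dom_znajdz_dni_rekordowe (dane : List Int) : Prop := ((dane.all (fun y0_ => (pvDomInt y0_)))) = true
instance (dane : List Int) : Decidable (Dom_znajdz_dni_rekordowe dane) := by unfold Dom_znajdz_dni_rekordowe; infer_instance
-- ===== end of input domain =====

-- B replaces A's single in-place running-max scan by a two-pass structure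
-- (prefix-maximum table, then a compare pass); equivalence is proved on all
-- nonempty lists (A raises IndexError on []).

-- ===== PORT A =====
-- one iteration of A's 'for i in range(len(dane))' loop; state = (max_temp, result)
def pvAStep (dane : List Int) (st : Int × List Bool) (i : Int) : Int × List Bool :=
  let temp := PySem.List.pyGetD dane i 0
  if temp > st.1 then (temp, PySem.List.pySetD st.2 i true) else st

def znajdz_dni_rekordowe (dane : List Int) : List Bool :=
  let result : List Bool := List.replicate dane.length false
  match PySem.List.pyGet? dane 0 with          -- max_temp = dane[0]; none = IndexError (outside Pre_)
  | none => []
  | some max_temp =>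
    let result := PySem.List.pySetD result 0 true     -- result[0] = True
    ((PySem.List.pyRange 0 dane.length 1).foldl (pvAStep dane) (max_temp, result)).2

-- ===== PORT B =====
-- one iteration of B's prefix-building loop: prefix.append(t if t > prefix[-1] else prefix[-1])
def pvBStep (pf : List Int) (t : Int) : List Int :=
  pf ++ [if t > PySem.List.pyGetD pf (-1) 0 then t else PySem.List.pyGetD pf (-1) 0]

def znajdz_dni_rekordowe_alt (dane : List Int) : List Bool :=
  let pfx := (PySem.List.slice dane (some 1) none).foldl pvBStep (PySem.List.slice dane none (some 1))
  [true] ++ ((PySem.List.slice dane (some 1) none).zip pfx).map (fun p => decide (p.1 > p.2))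

-- ===== PRECONDITION & SPEC =====
-- A evaluates dane[0]; on the empty list it raises IndexError, so [] is excluded.
def Pre_znajdz_dni_rekordowe (dane : List Int) : Prop := dane ≠ []
instance (dane : List Int) : Decidable (Pre_znajdz_dni_rekordowe dane) := by
  unfold Pre_znajdz_dni_rekordowe; infer_instance

def pvWitness_znajdz_dni_rekordowe : List Int := ([3, 1, 4])

def Spec_znajdz_dni_rekordowe (dane : List Int) (out : List Bool) : Prop := out = znajdz_dni_rekordowe_alt dane
instance (dane : List Int) (out : List Bool) : Decidable (Spec_znajdz_dni_rekordowe dane out) := by unfold Spec_znajdz_dni_rekordowe; infer_instance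

-- ===== CLAIM (what is proved, stated in full; the proofs are below) =====
def Claim_equal_znajdz_dni_rekordowe : Prop := ∀ (dane : List Int), Dom_znajdz_dni_rekordowe dane → Pre_znajdz_dni_rekordowe dane → Spec_znajdz_dni_rekordowe dane (znajdz_dni_rekordowe dane)

-- ===== LEMMAS AND PROOFS =====

-- common characterisation: record flags for the days in ts, given running max m
def pvCore (m : Int) : List Int → List Bool
  | [] => []
  | t :: ts => decide (t > m) :: pvCore (if t > m then t else m) ts

-- the prefix maxima of ts, given running max m
def pvScan (m : Int) : List Int → List Int
  | [] => []
  | t :: ts => (if t > m then t else m) :: pvScan (if t > m then t else m) ts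

theorem pvB_prefix (ts : List Int) : ∀ (pf : List Int) (m : Int),
    PySem.List.pyGetD pf (-1) 0 = m →
    ts.foldl pvBStep pf = pf ++ pvScan m ts := by
  induction ts with
  | nil => intro pf m _; simp [pvScan]
  | cons t ts ih =>
    intro pf m hm
    have hstep : pvBStep pf t = pf ++ [if t > m then t else m] := by
      simp [pvBStep, hm]
    rw [List.foldl_cons, hstep,
      ih (pf ++ [if t > m then t else m]) (if t > m then t else m)
        (PySem.List.pyGetD_neg_one_append_singleton ..)]
    simp [pvScan]

theorem pvB_zip (ts : List Int) : ∀ (m : Int),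
    ((ts.zip (m :: pvScan m ts)).map (fun p => decide (p.1 > p.2))) = pvCore m ts := by
  induction ts with
  | nil => intro m; simp [pvCore]
  | cons t ts ih =>
    intro m
    simp only [pvScan, pvCore, List.zip_cons_cons, List.map_cons]
    rw [ih]

theorem pvB_eq (d0 : Int) (rest : List Int) :
    znajdz_dni_rekordowe_alt (d0 :: rest) = true :: pvCore d0 rest := by
  unfold znajdz_dni_rekordowe_alt
  simp only [PySem.List.slice_from_one, List.tail_cons]
  have h1 : PySem.List.slice (d0 :: rest) none (some 1) = [d0] := by
    rw [PySem.List.slice_to _ (by norm_num)]; simp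
  rw [h1, pvB_prefix rest [d0] d0 (by simp [PySem.List.pyGetD, PySem.List.pyGet?_neg_one])]
  have h3 : [d0] ++ pvScan d0 rest = d0 :: pvScan d0 rest := rfl
  rw [h3, pvB_zip]
  rfl

theorem pvA_loop (ts : List Int) : ∀ (dane : List Int) (k : Nat) (m : Int) (res : List Bool),
    dane.drop k = ts → res.length = dane.length →
    res.drop k = List.replicate (dane.length - k) false →
    ((PySem.List.pyRange (k : Int) dane.length 1).foldl (pvAStep dane) (m, res)).2
      = res.take k ++ pvCore m ts := by
  induction ts with
  | nil =>
    intro dane k m res hdrop hlen hrep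
    have hk : dane.length ≤ k := by
      have := congrArg List.length hdrop; simp at this; omega
    rw [PySem.List.pyRange_one_eq_nil (by exact_mod_cast hk)]
    show res = res.take k ++ pvCore m []
    rw [List.take_of_length_le (show res.length ≤ k by omega)]
    simp [pvCore]
  | cons t ts ih =>
    intro dane k m res hdrop hlen hrep
    have hk : k < dane.length := by
      have := congrArg List.length hdrop; simp at this; omega
    have ht : dane[k]? = some t := by
      have h0 : (dane.drop k)[0]? = some t := by rw [hdrop]; rfl
      simpa using h0
    have hresk : res[k]? = some false := by
      have h0 : (res.drop k)[0]? = some false := by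
        rw [hrep]; simp [List.getElem?_replicate]; omega
      simpa using h0
    rw [PySem.List.pyRange_one_cons (by exact_mod_cast hk), List.foldl_cons]
    have hstep : pvAStep dane (m, res) (k : Int)
        = (if t > m then t else m, if t > m then res.set k true else res) := by
      unfold pvAStep
      rw [PySem.List.pyGetD_natCast, List.getD_eq_getElem?_getD, ht]
      by_cases h : t > m <;> simp [h]
    rw [hstep]
    have hcast : ((k : Int) + 1) = ((k + 1 : Nat) : Int) := by push_cast; ring
    have h1 : res.drop (k + 1) = List.replicate (dane.length - (k + 1)) false := by
      rw [← List.drop_drop, hrep, List.drop_replicate]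
      congr 1
    have hdrop' : (if t > m then res.set k true else res).drop (k + 1)
        = List.replicate (dane.length - (k + 1)) false := by
      by_cases h : t > m
      · rw [if_pos h, List.drop_set, if_pos (by omega), h1]
      · rw [if_neg h, h1]
    rw [hcast,
      ih dane (k + 1) (if t > m then t else m) (if t > m then res.set k true else res)
        (by rw [← List.drop_drop, hdrop]; rfl)
        (by by_cases h : t > m
            · rw [if_pos h, List.length_set]; exact hlen
            · rw [if_neg h]; exact hlen)
        hdrop']
    have htake : (if t > m then res.set k true else res).take (k + 1)
        = res.take k ++ [decide (t > m)] := by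
      by_cases h : t > m
      · rw [if_pos h, List.take_add_one, List.take_set,
          List.getElem?_set_self (by omega : k < res.length),
          List.set_eq_of_length_le (by simp : (res.take k).length ≤ k)]
        simp [h]
      · rw [if_neg h, List.take_add_one, hresk]
        simp [h]
    rw [htake]
    simp [pvCore]

theorem pvA_eq (d0 : Int) (rest : List Int) :
    znajdz_dni_rekordowe (d0 :: rest) = true :: pvCore d0 rest := by
  unfold znajdz_dni_rekordowe
  simp only [PySem.List.pyGet?_zero_cons]
  have hset : PySem.List.pySetD (List.replicate (d0 :: rest).length false) 0 true
      = true :: List.replicate rest.length false := by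
    have := PySem.List.pySetD_natCast (List.replicate (d0 :: rest).length false) 0 true
    simp at this
    simpa [List.replicate_succ] using this
  rw [hset]
  have h0 : ((d0 :: rest).length : Int) > 0 := by simp
  rw [show ((0 : Int)) = ((0 : Nat) : Int) from rfl,
    PySem.List.pyRange_one_cons (by exact_mod_cast h0), List.foldl_cons]
  have hstep : pvAStep (d0 :: rest) (d0, true :: List.replicate rest.length false) ((0 : Nat) : Int)
      = (d0, true :: List.replicate rest.length false) := by
    unfold pvAStep
    simp
  rw [hstep]
  have hcast : (((0 : Nat) : Int) + 1) = ((1 : Nat) : Int) := by norm_num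
  rw [hcast,
    pvA_loop rest (d0 :: rest) 1 d0 (true :: List.replicate rest.length false)
      (by rfl) (by simp) (by simp)]
  rfl

-- ===== VERDICT (by name: the statement is the Claim_ definition above) =====
theorem znajdz_dni_rekordowe_spec : Claim_equal_znajdz_dni_rekordowe := by
  intro dane _ hpre
  match dane with
  | [] => exact absurd rfl hpre
  | d0 :: rest =>
    show znajdz_dni_rekordowe (d0 :: rest) = znajdz_dni_rekordowe_alt (d0 :: rest)
    rw [pvA_eq, pvB_eq]
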